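-- pv_equiv track=rewrite | github.com/jms7446/hackerrank | baekjoon/alg-study/w20/p3015.py | solve
-- ===== SOURCE A (Python) =====
-- def solve(n, xs):
--     count = 0
--     stack = []
--     for x in xs:
--         for i in reversed(range(len(stack))):
--             if stack[i][0] > x:
--                 count += 1
--                 break
--             elif stack[i][0] == x:
--                 count += stack[i][1]
--             else:
--                 count += stack[i][1]
--                 stack.pop()
--         if stack and stack[-1][0] == x:
--             stack[-1][1] += 1
--         else:
--             stack.append([x, 1])
--     return count
-- ===== SOURCE B (Python) =====
-- def solve(n, xs):
--     count = 0
--     seen = []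
--     for x in xs:
--         bmax = None
--         for y in reversed(seen):
--             if bmax is None or bmax <= min(x, y):
--                 count += 1
--             bmax = y if bmax is None else max(bmax, y)
--         seen.append(x)
--     return count
-- ===== Notes on version B (the rewrite author's own statement) =====
-- stated objective: simpler
-- what changed: Replaces the monotonic stack of (height, run-count) pairs, with its pop/merge/break bookkeeping, by a plain nested scan: for each new element, walk the earlier elements from most recent backwards keeping the running max of the elements in between and count a pair whenever that max is at most the smaller endpoint.
import Mathlib
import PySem

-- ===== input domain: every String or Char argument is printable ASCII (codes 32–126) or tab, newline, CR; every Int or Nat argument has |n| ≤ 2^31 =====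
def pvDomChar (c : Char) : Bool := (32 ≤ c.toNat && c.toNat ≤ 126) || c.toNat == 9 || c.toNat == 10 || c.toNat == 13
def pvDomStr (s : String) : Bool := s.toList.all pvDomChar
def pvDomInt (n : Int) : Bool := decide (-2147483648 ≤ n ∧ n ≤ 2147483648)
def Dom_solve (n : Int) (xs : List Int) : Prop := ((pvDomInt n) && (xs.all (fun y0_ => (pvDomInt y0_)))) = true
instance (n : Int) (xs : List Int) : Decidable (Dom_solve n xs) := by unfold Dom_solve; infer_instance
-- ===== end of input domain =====

-- B replaces A's single monotonic-stack pass by the plain quadratic scan (for each new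
-- element, walk the earlier elements backwards with a running max); objective: simpler.

-- ===== PORT A =====
-- Python stack list, last element = top; here head = top.  The inner `for i in
-- reversed(range(len(stack)))` scans from the top; `stack.pop()` in the `<` branch removes
-- exactly the entry under scan (the inner loop only reaches an entry after popping all
-- entries above it, and after an `==` match the next entry is `>` and breaks), so the scan
-- is this structural recursion.
def solveInner (x : Int) : List (Int × Int) → Int × List (Int × Int)
  | [] => (0, [])
  | (v, c) :: rest =>
    if v > x then (1, (v, c) :: rest)                   -- count += 1; break
    else if v = x then
      let r := solveInner x rest
      (c + r.1, (v, c) :: r.2)                          -- count += c; keep entry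
    else
      let r := solveInner x rest
      (c + r.1, r.2)                                    -- count += c; stack.pop()

-- the trailing `if stack and stack[-1][0] == x: … else: stack.append([x, 1])`
def solvePush (x : Int) : List (Int × Int) → List (Int × Int)
  | [] => [(x, 1)]
  | (v, c) :: rest => if v = x then (v, c + 1) :: rest else (x, 1) :: (v, c) :: rest

def solveLoop : List Int → Int → List (Int × Int) → Int
  | [], count, _ => count
  | x :: xs, count, stack =>
    let r := solveInner x stack
    solveLoop xs (count + r.1) (solvePush x r.2)

def solve (n : Int) (xs : List Int) : Int := solveLoop xs 0 []

-- ===== PORT B =====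
-- `seen` is kept head-first here, so Python's `for y in reversed(seen)` is direct
-- iteration and `seen.append(x)` is cons.
def altVis (x y : Int) : Option Int → Bool
  | none => true
  | some b => decide (b ≤ min x y)

def altUpd (y : Int) : Option Int → Int
  | none => y
  | some b => max b y

def altInner (x : Int) : List Int → Option Int → Int
  | [], _ => 0
  | y :: ys, bmax => (if altVis x y bmax then 1 else 0) + altInner x ys (some (altUpd y bmax))

def altLoop : List Int → List Int → Int → Int
  | _, [], count => count
  | seen, x :: rest, count => altLoop (x :: seen) rest (count + altInner x seen none)

def solve_alt (n : Int) (xs : List Int) : Int := altLoop [] xs 0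

-- ===== PRECONDITION & SPEC =====
def Spec_solve (n : Int) (xs : List Int) (out : Int) : Prop := out = solve_alt n xs
instance (n : Int) (xs : List Int) (out : Int) : Decidable (Spec_solve n xs out) := by unfold Spec_solve; infer_instance

-- ===== CLAIM (what is proved, stated in full; the proofs are below) =====
def Claim_equal_solve : Prop := ∀ (n : Int) (xs : List Int), Dom_solve n xs → Spec_solve n xs (solve n xs)

-- ===== LEMMAS AND PROOFS =====

-- stack after A has processed a prefix, the prefix given REVERSED (head = most recent)
def stackR : List Int → List (Int × Int)
  | [] => []
  | y :: r => solvePush y (solveInner y (stackR r)).2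

def cntS (x : Int) (S : List (Int × Int)) : Int := (solveInner x S).1

def filtGE (b : Int) (S : List (Int × Int)) : List (Int × Int) := S.filter (fun p => b ≤ p.1)

def Incr (S : List (Int × Int)) : Prop := S.Pairwise (fun p q => p.1 < q.1)

theorem allGE_filtGE (b : Int) (S : List (Int × Int)) : ∀ p ∈ filtGE b S, b ≤ p.1 := by
  intro p hp
  have := List.of_mem_filter hp
  simpa using this

theorem filtGE_eq_self {b : Int} {S : List (Int × Int)} (h : ∀ p ∈ S, b ≤ p.1) :
    filtGE b S = S := by
  apply List.filter_eq_self.2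
  intro p hp; simpa using h p hp

theorem filtGE_filtGE {y b : Int} (h : y ≤ b) (S : List (Int × Int)) :
    filtGE b (filtGE y S) = filtGE b S := by
  induction S with
  | nil => rfl
  | cons p rest ih =>
    by_cases hb : b ≤ p.1
    · have hy : y ≤ p.1 := le_trans h hb
      simp [filtGE, hb, hy] at *
      simpa [filtGE] using ih
    · by_cases hy : y ≤ p.1 <;> simp [filtGE, hb, hy] at * <;> simpa [filtGE] using ih

theorem filtGE_cons_pos {b : Int} {p : Int × Int} (h : b ≤ p.1) (S : List (Int × Int)) :
    filtGE b (p :: S) = p :: filtGE b S := by simp [filtGE, h]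

theorem filtGE_cons_neg {b : Int} {p : Int × Int} (h : ¬ b ≤ p.1) (S : List (Int × Int)) :
    filtGE b (p :: S) = filtGE b S := by simp [filtGE, h]

-- the inner loop of A pops exactly the entries below the new value (stack sorted)
theorem inner_snd_eq_filtGE {x : Int} {S : List (Int × Int)} (h : Incr S) :
    (solveInner x S).2 = filtGE x S := by
  induction S with
  | nil => rfl
  | cons p rest ih =>
    obtain ⟨v, c⟩ := p
    have hrest : Incr rest := (List.pairwise_cons.1 h).2
    have habove : ∀ q ∈ rest, v < q.1 := (List.pairwise_cons.1 h).1
    by_cases h1 : x < v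
    · have hfr : filtGE x rest = rest :=
        filtGE_eq_self (fun q hq => le_of_lt (lt_trans h1 (habove q hq)))
      rw [filtGE_cons_pos (le_of_lt h1), hfr]
      simp [solveInner, h1]
    · by_cases h2 : v = x
      · subst h2
        rw [filtGE_cons_pos (le_refl v), ← ih hrest]
        simp [solveInner]
      · have hvx : v < x := lt_of_le_of_ne (not_lt.1 h1) h2
        rw [filtGE_cons_neg (not_le.2 hvx), ← ih hrest]
        simp [solveInner, h1, h2]

theorem incr_push {y : Int} {T : List (Int × Int)} (h : Incr T) (hGE : ∀ p ∈ T, y ≤ p.1) :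
    Incr (solvePush y T) := by
  cases T with
  | nil => simp [solvePush, Incr]
  | cons p rest =>
    obtain ⟨v, c⟩ := p
    by_cases hv : v = y
    · simp only [solvePush, if_pos hv]
      exact List.pairwise_cons.2 ⟨(List.pairwise_cons.1 h).1, (List.pairwise_cons.1 h).2⟩
    · simp only [solvePush, if_neg hv]
      refine List.pairwise_cons.2 ⟨?_, h⟩
      intro q hq
      rcases List.mem_cons.1 hq with rfl | hq'
      · exact lt_of_le_of_ne (hGE (v, c) (by simp)) (fun hh => hv hh.symm)
      · exact lt_of_le_of_lt (hGE (v, c) (by simp)) ((List.pairwise_cons.1 h).1 q hq')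

theorem allGE_push {y b : Int} {T : List (Int × Int)} (hby : b ≤ y) (hGE : ∀ p ∈ T, y ≤ p.1) :
    ∀ p ∈ solvePush y T, b ≤ p.1 := by
  cases T with
  | nil => intro p hp; simp [solvePush] at hp; simp [hp, hby]
  | cons q rest =>
    obtain ⟨v, c⟩ := q
    by_cases hv : v = y
    · intro p hp
      simp [solvePush, hv] at hp
      rcases hp with h | h
      · simp [h, hby]
      · exact le_trans hby (hGE p (by simp [h]))
    · intro p hp
      simp [solvePush, hv] at hp
      rcases hp with h | h | h
      · simp [h, hby]
      · exact le_trans hby (hGE p (by simp [h]))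
      · exact le_trans hby (hGE p (by simp [h]))

theorem incr_stackR (r : List Int) : Incr (stackR r) := by
  induction r with
  | nil => simp [stackR, Incr]
  | cons y r ih =>
    have hpop : (solveInner y (stackR r)).2 = filtGE y (stackR r) := inner_snd_eq_filtGE ih
    have hfi : Incr (filtGE y (stackR r)) := by
      unfold Incr at *
      exact List.Pairwise.filter _ ih
    have hge : ∀ p ∈ filtGE y (stackR r), y ≤ p.1 := allGE_filtGE y (stackR r)
    rw [stackR, hpop]
    exact incr_push hfi hge

theorem stackR_cons (y : Int) (r : List Int) :
    stackR (y :: r) = solvePush y (filtGE y (stackR r)) := by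
  rw [stackR, inner_snd_eq_filtGE (incr_stackR r)]

theorem allGE_stackR_cons {b y : Int} (r : List Int) (hby : b ≤ y) :
    ∀ p ∈ stackR (y :: r), b ≤ p.1 := by
  rw [stackR_cons]
  exact allGE_push hby (allGE_filtGE y (stackR r))

theorem cntS_push_le {x y : Int} (hyx : y ≤ x) (T : List (Int × Int)) :
    cntS x (solvePush y T) = 1 + cntS x T := by
  have hny : ¬ x < y := not_lt.2 hyx
  cases T with
  | nil => by_cases h : y = x <;> simp [cntS, solvePush, solveInner, hny, h]
  | cons p rest =>
    obtain ⟨v, c⟩ := p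
    by_cases hv : v = y
    · subst hv
      by_cases h2 : v = x
      · subst h2; simp [cntS, solvePush, solveInner]; ring
      · simp [cntS, solvePush, solveInner, hny, h2]; ring
    · by_cases h2 : y = x
      · subst h2
        simp [cntS, solveInner, solvePush, hv]
      · simp [cntS, solveInner, solvePush, hv, h2, hny]

theorem cntS_push_gt {x y : Int} (hxy : x < y) (T : List (Int × Int)) :
    cntS x (solvePush y T) = 1 := by
  cases T with
  | nil => simp [cntS, solvePush, solveInner, hxy]
  | cons p rest =>
    obtain ⟨v, c⟩ := p
    by_cases hv : v = y
    · subst hv; simp [cntS, solvePush, solveInner, hxy]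
    · simp [cntS, solvePush, solveInner, hv, hxy]

theorem filtGE_push_lt {y b : Int} (h : y < b) (T : List (Int × Int)) :
    filtGE b (solvePush y T) = filtGE b T := by
  cases T with
  | nil => simp [solvePush, filtGE, not_le.2 h]
  | cons p rest =>
    obtain ⟨v, c⟩ := p
    by_cases hv : v = y
    · subst hv; simp [solvePush, filtGE, not_le.2 h]
    · simp [solvePush, filtGE, hv, not_le.2 h]

-- the backward scan is zero once the running max exceeds x
theorem altInner_dead {x : Int} (r : List Int) : ∀ b : Int, x < b → altInner x r (some b) = 0 := by
  induction r with
  | nil => intro b _; rfl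
  | cons y ys ih =>
    intro b hb
    have hvis : ¬ (b ≤ min x y) := by
      intro hle; exact absurd (le_trans hle (min_le_left _ _)) (not_le.2 hb)
    have : altVis x y (some b) = false := by simp [altVis, hvis]
    simp [altInner, this, altUpd]
    exact ih (max b y) (lt_of_lt_of_le hb (le_max_left _ _))

-- KEY, bounded form: backward scan with lower bound b ≤ x vs the stack above b
theorem altInner_some {x : Int} (r : List Int) :
    ∀ b : Int, b ≤ x → altInner x r (some b) = cntS x (filtGE b (stackR r)) := by
  induction r with
  | nil => intro b _; rfl
  | cons y ys ih =>
    intro b hbx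
    by_cases hby : b ≤ y
    · have hvis : altVis x y (some b) = true := by simp [altVis, le_min hbx hby]
      have hupd : altUpd y (some b) = y := by simp [altUpd, max_eq_right hby]
      have hself : filtGE b (stackR (y :: ys)) = stackR (y :: ys) :=
        filtGE_eq_self (allGE_stackR_cons ys hby)
      by_cases hyx : y ≤ x
      · rw [hself, stackR_cons, cntS_push_le hyx]
        simp [altInner, hvis, hupd, ih y hyx]
      · have hxy : x < y := not_le.1 hyx
        rw [hself, stackR_cons, cntS_push_gt hxy]
        simp [altInner, hvis, hupd]
        exact altInner_dead ys y hxy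
    · have hvis : altVis x y (some b) = false := by
        have : ¬ (b ≤ min x y) := fun hle => hby (le_trans hle (min_le_right _ _))
        simp [altVis, this]
      have hupd : altUpd y (some b) = b := by simp [altUpd, max_eq_left (le_of_lt (not_le.1 hby))]
      rw [stackR_cons, filtGE_push_lt (not_le.1 hby), filtGE_filtGE (le_of_lt (not_le.1 hby))]
      simp [altInner, hvis, hupd]
      exact ih b hbx

-- KEY: A's per-step stack count = B's per-step backward scan
theorem altInner_none (x : Int) (r : List Int) : altInner x r none = cntS x (stackR r) := by
  cases r with
  | nil => rfl
  | cons y ys =>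
    have hvis : altVis x y none = true := rfl
    have hupd : altUpd y none = y := rfl
    by_cases hyx : y ≤ x
    · rw [stackR_cons, cntS_push_le hyx]
      simp [altInner, hvis, hupd, altInner_some ys y hyx]
    · have hxy : x < y := not_le.1 hyx
      rw [stackR_cons, cntS_push_gt hxy]
      simp [altInner, hvis, hupd]
      exact altInner_dead ys y hxy

theorem loop_eq (rest : List Int) : ∀ (r : List Int) (count : Int),
    solveLoop rest count (stackR r) = altLoop r rest count := by
  induction rest with
  | nil => intro r count; rfl
  | cons x xs ih =>
    intro r count
    have hsnd : (solveInner x (stackR r)).2 = filtGE x (stackR r) :=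
      inner_snd_eq_filtGE (incr_stackR r)
    have hstack : solvePush x (solveInner x (stackR r)).2 = stackR (x :: r) := by
      rw [hsnd, ← stackR_cons]
    have hcnt : (solveInner x (stackR r)).1 = altInner x r none := (altInner_none x r).symm
    show solveLoop xs (count + (solveInner x (stackR r)).1) (solvePush x (solveInner x (stackR r)).2)
        = altLoop (x :: r) xs (count + altInner x r none)
    rw [hstack, hcnt, ih (x :: r) (count + altInner x r none)]

-- ===== VERDICT (by name: the statement is the Claim_ definition above) =====
theorem solve_spec : Claim_equal_solve := by
  intro n xs _
  show solve n xs = solve_alt n xs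
  have := loop_eq xs [] 0
  simpa [solve, solve_alt, stackR] using this
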